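-- pv_equiv track=rewrite | github.com/IGinX-THU/-TSBS-IGinX | iginx_py_udfs/udf_avg_driving_session_div_6.py | driving_session
-- ===== SOURCE A (Python) =====
-- def driving_session(seq):
--     first = None
--     for i, is_driving in enumerate(seq):
--         if first is None:
--             if is_driving:
--                 first = i
--             continue
--         if not is_driving:
--             yield i - first
--             first = None
-- ===== SOURCE B (Python) =====
-- def driving_session(seq):
--     # run-length encode the sequence by truthiness, then emit the length of
--     # each driving run that is followed by another group (i.e. terminated)
--     groups = []
--     for x in seq:
--         k = bool(x)
--         if groups and groups[-1][0] == k: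
--             groups[-1][1] += 1
--         else:
--             groups.append([k, 1])
--     pending = None
--     for k, n in groups:
--         if pending is not None:
--             yield pending
--             pending = None
--         if k:
--             pending = n
-- ===== Notes on version B (the rewrite author's own statement) =====
-- stated objective: alternative
-- what changed: B first run-length-encodes the sequence by truthiness in one forward pass and then scans the group list, emitting each driving run's length once a following group terminates it, instead of A's single scan that stores the run's start index and subtracts it.
import Mathlib
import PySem

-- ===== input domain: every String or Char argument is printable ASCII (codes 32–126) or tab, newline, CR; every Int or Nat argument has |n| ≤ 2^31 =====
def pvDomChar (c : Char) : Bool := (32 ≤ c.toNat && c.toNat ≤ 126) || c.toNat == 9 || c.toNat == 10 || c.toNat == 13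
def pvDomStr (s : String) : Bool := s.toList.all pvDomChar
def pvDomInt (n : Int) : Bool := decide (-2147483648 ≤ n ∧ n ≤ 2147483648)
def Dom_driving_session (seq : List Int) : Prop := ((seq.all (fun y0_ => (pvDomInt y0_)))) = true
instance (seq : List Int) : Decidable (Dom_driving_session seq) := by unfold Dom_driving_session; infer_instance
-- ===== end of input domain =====

-- B recomputes the same output by a different structure: it run-length-encodes
-- the sequence by truthiness and then emits terminated driving-run lengths.

-- ===== PORT A =====
-- A's loop over enumerate(seq) with state `first` (index of the current
-- driving run's start) and the list of yielded values.
def dsLoopA : List (Int × Int) → Option Int → List Int → List Int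
  | [], _, out => out
  | (i, x) :: rest, first, out =>
    match first with
    | none => dsLoopA rest (if x ≠ 0 then some i else none) out
    | some f => if x = 0 then dsLoopA rest none (out ++ [i - f]) else dsLoopA rest (some f) out

def driving_session (seq : List Int) : List Int :=
  dsLoopA (PySem.List.enumerate seq) none []

-- ===== PORT B =====
-- B's first loop: forward run-length encoding; each element either extends the
-- last group or appends a fresh one.
def dsAddF (gs : List (Bool × Int)) (x : Int) : List (Bool × Int) :=
  match gs.getLast? with
  | some (k, n) =>
    if decide (x ≠ 0) = k then gs.dropLast ++ [(k, n + 1)]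
    else gs ++ [(decide (x ≠ 0), 1)]
  | none => [(decide (x ≠ 0), 1)]

def dsGroups (seq : List Int) : List (Bool × Int) := seq.foldl dsAddF []

-- B's second loop: emit pending driving length when the next group arrives.
def dsLoopB : List (Bool × Int) → Option Int → List Int → List Int
  | [], _, out => out
  | (k, n) :: rest, pending, out =>
    let out' := match pending with | some p => out ++ [p] | none => out
    dsLoopB rest (if k then some n else none) out'

def driving_session_alt (seq : List Int) : List Int :=
  dsLoopB (dsGroups seq) none []

-- ===== PRECONDITION & SPEC =====
def Spec_driving_session (seq : List Int) (out : List Int) : Prop := out = driving_session_alt seq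
instance (seq : List Int) (out : List Int) : Decidable (Spec_driving_session seq out) := by unfold Spec_driving_session; infer_instance

-- ===== CLAIM (what is proved, stated in full; the proofs are below) =====
def Claim_equal_driving_session : Prop := ∀ (seq : List Int), Dom_driving_session seq → Spec_driving_session seq (driving_session seq)

-- ===== LEMMAS AND PROOFS =====

-- Reference function: scan with the current driving run's length.
def dsGo : List Int → Option Int → List Int
  | [], _ => []
  | x :: xs, none => dsGo xs (if x ≠ 0 then some 1 else none)
  | x :: xs, some c => if x = 0 then c :: dsGo xs none else dsGo xs (some (c + 1))

theorem dsLoopA_eq (l : List Int) : ∀ (i : Int) (c : Option Int) (out : List Int),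
    dsLoopA (PySem.List.enumerate l i) (c.map (fun c => i - c)) out = out ++ dsGo l c := by
  induction l with
  | nil => intro i c out; simp [PySem.List.enumerate_nil, dsLoopA, dsGo]
  | cons x xs ih =>
    intro i c out
    rw [PySem.List.enumerate_cons]
    cases c with
    | none =>
      by_cases hx : x = 0
      · simpa [dsLoopA, dsGo, hx] using ih (i + 1) none out
      · have := ih (i + 1) (some 1) out
        simp only [Option.map_some] at this
        simpa [dsLoopA, dsGo, hx] using this
    | some n =>
      by_cases hx : x = 0
      · have hrec := ih (i + 1) none (out ++ [n])
        simp only [Option.map_none] at hrec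
        have harith : i - (i - n) = n := by ring
        simpa [dsLoopA, dsGo, hx, harith] using hrec
      · have := ih (i + 1) (some (n + 1)) out
        simp only [Option.map_some] at this
        have harith : i + 1 - (n + 1) = i - n := by ring
        rw [harith] at this
        simpa [dsLoopA, dsGo, hx] using this

-- Back-to-front run-length encoding (a proof device; B's port builds forward).
def dsAdd (x : Int) (gs : List (Bool × Int)) : List (Bool × Int) :=
  match gs with
  | (k, n) :: rest => if decide (x ≠ 0) = k then (k, n + 1) :: rest else (decide (x ≠ 0), 1) :: (k, n) :: rest
  | [] => [(decide (x ≠ 0), 1)]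

def dsGroupsR (seq : List Int) : List (Bool × Int) := seq.foldr dsAdd []

-- `dsBumpK k c gs`: merge a leading run of key k and length c into gs.
def dsBumpK (k : Bool) (c : Int) (gs : List (Bool × Int)) : List (Bool × Int) :=
  match gs with
  | (k', n) :: rest => if k' = k then (k, c + n) :: rest else (k, c) :: (k', n) :: rest
  | [] => [(k, c)]

theorem dsAdd_eq_bumpK (x : Int) (gs : List (Bool × Int)) :
    dsAdd x gs = dsBumpK (decide (x ≠ 0)) 1 gs := by
  cases gs with
  | nil => rfl
  | cons g rest =>
    obtain ⟨k, n⟩ := g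
    cases hb : decide (x ≠ 0) <;> cases k <;> simp [dsAdd, dsBumpK, hb, Int.add_comm]

theorem dsAddF_ne_nil (gs : List (Bool × Int)) (x : Int) : dsAddF gs x ≠ [] := by
  unfold dsAddF
  split
  · split_ifs <;> simp
  · simp

theorem dsAddF_append (pre gs : List (Bool × Int)) (x : Int) (h : gs ≠ []) :
    dsAddF (pre ++ gs) x = pre ++ dsAddF gs x := by
  unfold dsAddF
  rw [List.getLast?_append_of_ne_nil _ h]
  cases hg : gs.getLast? with
  | none => exact absurd (List.getLast?_eq_none_iff.mp hg) h
  | some g =>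
    obtain ⟨k, n⟩ := g
    have hd : (pre ++ gs).dropLast = pre ++ gs.dropLast := by
      rw [List.dropLast_append_of_ne_nil]; exact h
    dsimp only
    split_ifs <;> simp [hd]

theorem dsAddF_singleton (x : Int) (k : Bool) (n : Int) :
    dsAddF [(k, n)] x = if decide (x ≠ 0) = k then [(k, n + 1)] else [(k, n), (decide (x ≠ 0), 1)] := by
  unfold dsAddF; rfl

theorem dsBumpK_head (k : Bool) (c : Int) (gs : List (Bool × Int)) :
    ∃ m rest, dsBumpK k c gs = (k, m) :: rest := by
  cases gs with
  | nil => exact ⟨c, [], rfl⟩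
  | cons g rest =>
    obtain ⟨k', n⟩ := g
    by_cases h : k' = k
    · exact ⟨c + n, rest, by simp [dsBumpK, h]⟩
    · exact ⟨c, (k', n) :: rest, by simp [dsBumpK, h]⟩

theorem dsBumpK_bumpK (k : Bool) (c d : Int) (gs : List (Bool × Int)) :
    dsBumpK k c (dsBumpK k d gs) = dsBumpK k (c + d) gs := by
  cases gs with
  | nil => simp [dsBumpK]
  | cons g rest =>
    obtain ⟨k', n⟩ := g
    by_cases h : k' = k
    · simp [dsBumpK, h, add_assoc]
    · simp [dsBumpK, h]

theorem foldl_dsAddF_append (xs : List Int) : ∀ (pre gs : List (Bool × Int)), gs ≠ [] →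
    List.foldl dsAddF (pre ++ gs) xs = pre ++ List.foldl dsAddF gs xs := by
  induction xs with
  | nil => intro pre gs h; simp
  | cons x xs ih =>
    intro pre gs h
    simp only [List.foldl_cons]
    rw [dsAddF_append pre gs x h, ih pre _ (dsAddF_ne_nil gs x)]

theorem foldl_dsAddF_single (xs : List Int) : ∀ (k : Bool) (n : Int),
    List.foldl dsAddF [(k, n)] xs = dsBumpK k n (List.foldl dsAddF [] xs) := by
  induction xs with
  | nil => intro k n; simp [dsBumpK]
  | cons x xs ih =>
    intro k n
    simp only [List.foldl_cons]
    by_cases h : decide (x ≠ 0) = k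
    · rw [show dsAddF [(k, n)] x = [(k, n + 1)] from by rw [dsAddF_singleton, if_pos h],
        show dsAddF [] x = [(k, 1)] from by rw [← h]; rfl,
        ih k (n + 1), ih k 1, dsBumpK_bumpK]
    · rw [show dsAddF [(k, n)] x = [(k, n)] ++ [(decide (x ≠ 0), 1)] from by
          rw [dsAddF_singleton, if_neg h]; rfl,
        foldl_dsAddF_append xs [(k, n)] [(decide (x ≠ 0), 1)] (by simp),
        show dsAddF [] x = [(decide (x ≠ 0), 1)] from rfl,
        ih (decide (x ≠ 0)) 1]
      obtain ⟨m, rest, hm⟩ := dsBumpK_head (decide (x ≠ 0)) 1 (List.foldl dsAddF [] xs)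
      rw [hm]
      simp only [dsBumpK]
      rw [if_neg h]
      rfl

-- The forward RLE of B's port equals the back-to-front RLE used by the proofs.
theorem dsGroups_eq_R (seq : List Int) : dsGroups seq = dsGroupsR seq := by
  induction seq with
  | nil => rfl
  | cons x xs ih =>
    show List.foldl dsAddF (dsAddF [] x) xs = dsAdd x (dsGroupsR xs)
    have h2 : dsAddF ([] : List (Bool × Int)) x = [(decide (x ≠ 0), 1)] := by simp [dsAddF]
    rw [h2, foldl_dsAddF_single xs (decide (x ≠ 0)) 1, dsAdd_eq_bumpK, ← ih]
    rfl

def dsBump (c : Int) (gs : List (Bool × Int)) : List (Bool × Int) := dsBumpK true c gs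

theorem dsAdd_driving (x : Int) (hx : x ≠ 0) (gs : List (Bool × Int)) :
    dsAdd x gs = dsBump 1 gs := by
  rw [dsAdd_eq_bumpK]; simp [dsBump, hx]

theorem dsBump_bump (c : Int) (gs : List (Bool × Int)) :
    dsBump c (dsBump 1 gs) = dsBump (c + 1) gs := by
  simp [dsBump, dsBumpK_bumpK]

theorem dsAdd_ne_nil (x : Int) (gs : List (Bool × Int)) : dsAdd x gs ≠ [] := by
  cases gs with
  | nil => simp [dsAdd]
  | cons g rest =>
    obtain ⟨k, n⟩ := g
    simp only [dsAdd]
    split_ifs <;> simp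

theorem dsGroupsR_eq_nil (xs : List Int) (h : dsGroupsR xs = []) : xs = [] := by
  cases xs with
  | nil => rfl
  | cons y ys => exact absurd h (dsAdd_ne_nil y (dsGroupsR ys))

theorem dsLoopB_eq (l : List Int) : ∀ (out : List Int),
    (dsLoopB (dsGroupsR l) none out = out ++ dsGo l none) ∧
    (∀ c, dsLoopB (dsBump c (dsGroupsR l)) none out = out ++ dsGo l (some c)) := by
  induction l with
  | nil =>
    intro out
    constructor
    · simp [dsGroupsR, dsLoopB, dsGo]
    · intro c; simp [dsGroupsR, dsBump, dsBumpK, dsLoopB, dsGo]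
  | cons x xs ih =>
    intro out
    have hgs : dsGroupsR (x :: xs) = dsAdd x (dsGroupsR xs) := rfl
    by_cases hx : x = 0
    · -- x is non-driving
      have hloop : dsLoopB (dsGroupsR (x :: xs)) none out = dsLoopB (dsGroupsR xs) none out := by
        rw [hgs]
        cases hgx : dsGroupsR xs with
        | nil => simp [dsAdd, dsLoopB, hx]
        | cons g rest =>
          obtain ⟨k, n⟩ := g
          cases k <;> simp [dsAdd, dsLoopB, hx]
      constructor
      · rw [hloop, (ih out).1]; simp [dsGo, hx]
      · intro c
        have hb : dsBump c (dsGroupsR (x :: xs)) = (true, c) :: dsGroupsR (x :: xs) := by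
          rw [hgs]
          cases hgx : dsGroupsR xs with
          | nil => simp [dsAdd, dsBump, dsBumpK, hx]
          | cons g rest =>
            obtain ⟨k, n⟩ := g
            cases k <;> simp [dsAdd, dsBump, dsBumpK, hx]
        rw [hb, hgs]
        cases hgx : dsGroupsR xs with
        | nil =>
          have hxs : xs = [] := dsGroupsR_eq_nil xs hgx
          subst hxs
          simp [dsAdd, dsLoopB, dsGo, hx]
        | cons g rest =>
          obtain ⟨k, n⟩ := g
          have h1 := (ih (out ++ [c])).1
          rw [hgx] at h1
          cases k
          · simp only [dsAdd, hx]
            simp [dsLoopB] at h1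
            simp [dsLoopB, dsGo, h1]
          · simp only [dsAdd, hx]
            simp [dsLoopB] at h1
            simp [dsLoopB, dsGo, h1]
    · -- x is driving
      have hadd : dsGroupsR (x :: xs) = dsBump 1 (dsGroupsR xs) := by
        rw [hgs, dsAdd_driving x hx]
      constructor
      · rw [hadd, ((ih out).2 1)]; simp [dsGo, hx]
      · intro c
        rw [hadd, dsBump_bump, ((ih out).2 (c + 1))]
        simp [dsGo, hx]

-- ===== VERDICT (by name: the statement is the Claim_ definition above) =====
theorem driving_session_spec : Claim_equal_driving_session := by
  intro seq _
  show driving_session seq = driving_session_alt seq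
  have hA := dsLoopA_eq seq 0 none []
  simp only [Option.map_none] at hA
  have hB := (dsLoopB_eq seq []).1
  simp [driving_session, driving_session_alt, dsGroups_eq_R, hA, hB]
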